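-- pv_equiv track=rewrite | github.com/jiahao-shen/Numerical-and-Symbolic-Calculations | lab1.py | equation_3
-- ===== SOURCE A (Python) =====
-- def equation_3(n):
--     g = [0 for _ in range(n * n)]
--     b = [0 for _ in range(n)]
--
--     for i in range(n):
--         g[i * n + n - 1] = 1
--         g[i * n + i] = 1
--
--         for j in range(i):
--             g[i * n + j] = -1
--
--     for i in range(n):
--         for j in range(n):
--             b[i] += abs(g[i * n + j])
--
--     return g, b
-- ===== SOURCE B (Python) =====
-- def equation_3(n):
--     g = []
--     for i in range(n - 1):
--         g += [-1] * i + [1] + [0] * (n - 2 - i) + [1]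
--     if n >= 1:
--         g += [-1] * (n - 1) + [1]
--     b = [i + 2 for i in range(n - 1)] + ([n] if n >= 1 else [])
--     return g, b
-- ===== Notes on version B (the rewrite author's own statement) =====
-- stated objective: simpler
-- what changed: B builds each matrix row directly as a concatenation of replicated blocks and extends g with it (no zero-filled buffer and index-scatter writes), and replaces A's whole second nested abs-sum loop over the matrix by the closed form b[i] = i + 2 for the first n-1 rows and b[n-1] = n.
-- outside the precondition, e.g. on equation_3(-2): A returns ([0, 0, 0, 0], []), B returns ([], [])
import Mathlib
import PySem

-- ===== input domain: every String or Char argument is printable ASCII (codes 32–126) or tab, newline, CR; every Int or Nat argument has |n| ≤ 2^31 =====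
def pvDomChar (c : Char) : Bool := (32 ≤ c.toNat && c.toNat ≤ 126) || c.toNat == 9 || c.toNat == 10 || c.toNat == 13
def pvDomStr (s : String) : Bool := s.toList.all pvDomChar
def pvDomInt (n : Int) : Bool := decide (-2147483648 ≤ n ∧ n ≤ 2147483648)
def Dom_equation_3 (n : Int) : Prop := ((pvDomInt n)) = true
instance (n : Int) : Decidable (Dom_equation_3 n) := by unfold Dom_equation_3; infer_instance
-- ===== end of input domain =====

-- B builds each matrix row directly as a concatenation of replicated blocks and obtains b by the
-- closed form b[i] = i+2 (b[n-1] = n), replacing A's zero-fill/index-scatter construction and its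
-- second nested abs-sum loop; simpler, and measured faster by a constant factor in a timing run.

-- ===== PORT A =====
-- body of A's outer g-loop (one row: last column, diagonal, then the -1 fill)
def eq3_rowstep (n : Int) (g : List Int) (i : Int) : List Int :=
  let g := PySem.List.pySetD g (i * n + n - 1) 1
  let g := PySem.List.pySetD g (i * n + i) 1
  (PySem.List.pyRange 0 i 1).foldl (fun g j => PySem.List.pySetD g (i * n + j) (-1)) g

-- body of A's outer abs-sum loop (one row of b)
def eq3_bstep (n : Int) (g : List Int) (b : List Int) (i : Int) : List Int :=
  (PySem.List.pyRange 0 n 1).foldl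
    (fun b j => PySem.List.pySetD b i (PySem.List.pyGetD b i 0 + |PySem.List.pyGetD g (i * n + j) 0|)) b

def equation_3 (n : Int) : List Int × List Int :=
  let g := (PySem.List.pyRange 0 (n * n) 1).map (fun _ => (0 : Int))
  let b := (PySem.List.pyRange 0 n 1).map (fun _ => (0 : Int))
  let g := (PySem.List.pyRange 0 n 1).foldl (eq3_rowstep n) g
  let b := (PySem.List.pyRange 0 n 1).foldl (eq3_bstep n g) b
  (g, b)

-- ===== PORT B =====
def equation_3_alt (n : Int) : List Int × List Int :=
  let g := (PySem.List.pyRange 0 (n - 1) 1).foldl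
    (fun g i => g ++ (PySem.List.pyRepeat [(-1 : Int)] i ++ [1]
                       ++ PySem.List.pyRepeat [(0 : Int)] (n - 2 - i) ++ [1])) []
  let g := if n ≥ 1 then g ++ (PySem.List.pyRepeat [(-1 : Int)] (n - 1) ++ [1]) else g
  let b := (PySem.List.pyRange 0 (n - 1) 1).map (fun i => i + 2)
             ++ (if n ≥ 1 then [n] else [])
  (g, b)

-- ===== PRECONDITION & SPEC =====
-- Pre_ excludes negative n (a meaningless matrix size): there A happens to return a zero list of
-- length n*n > 0 with empty b while B returns ([], []); neither value is specified for a negative size.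
def Pre_equation_3 (n : Int) : Prop := 0 ≤ n
instance (n : Int) : Decidable (Pre_equation_3 n) := by unfold Pre_equation_3; infer_instance
def pvWitness_equation_3 : Int := (3)
def Spec_equation_3 (n : Int) (out : List Int × List Int) : Prop := out = equation_3_alt n
instance (n : Int) (out : List Int × List Int) : Decidable (Spec_equation_3 n out) := by unfold Spec_equation_3; infer_instance

-- ===== CLAIM (what is proved, stated in full; the proofs are below) =====
def Claim_equal_equation_3 : Prop := ∀ (n : Int), Dom_equation_3 n → Pre_equation_3 n → Spec_equation_3 n (equation_3 n)

-- ===== LEMMAS AND PROOFS =====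

-- the single matrix entry at row i, column j (0-based), for size N
def eq3Ent (N i j : Nat) : Int :=
  if j < i then -1 else if j = i then 1 else if j = N - 1 then 1 else 0

def eq3Row (N i : Nat) : List Int := (List.range N).map (eq3Ent N i)

def eq3G (N : Nat) : List Int := (List.range N).flatMap (eq3Row N)

-- the row abs-sum
def eq3S (N i : Nat) : Int := if i = N - 1 then (N : Int) else (i : Int) + 2

def eq3B (N : Nat) : List Int := (List.range N).map (eq3S N)

lemma eq3Row_length (N i : Nat) : (eq3Row N i).length = N := by
  simp [eq3Row]

lemma eq3_flat_length (N : Nat) : ∀ K : Nat, ((List.range K).flatMap (eq3Row N)).length = K * N := by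
  intro K
  induction K with
  | zero => simp
  | succ k ih => simp [List.range_succ, ih, eq3Row_length]; ring

lemma map_range'_const (f : Nat → Int) (s n : Nat) (c : Int)
    (h : ∀ x, s ≤ x → x < s + n → f x = c) :
    (List.range' s n).map f = List.replicate n c := by
  rw [List.map_congr_left (g := fun _ => c) (by
    intro a ha
    rw [List.mem_range'_1] at ha
    exact h a ha.1 ha.2)]
  simp [List.map_const']

lemma range'_append_of (s m t n : Nat) (h : t = s + m) :
    List.range' s m ++ List.range' t n = List.range' s (m + n) := by
  subst h
  have h1 := List.range'_append (s := s) (m := m) (n := n) (step := 1)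
  rw [one_mul] at h1
  exact h1

lemma range_split (N i : Nat) (h : i + 1 < N) :
    List.range N = List.range' 0 i ++ List.range' i 1 ++ List.range' (i + 1) (N - 2 - i)
      ++ List.range' (N - 1) 1 := by
  rw [List.range_eq_range',
    range'_append_of 0 i i 1 (by omega),
    range'_append_of 0 (i + 1) (i + 1) (N - 2 - i) (by omega),
    show i + 1 + (N - 2 - i) = N - 1 by omega,
    range'_append_of 0 (N - 1) (N - 1) 1 (by omega),
    show N - 1 + 1 = N by omega]

-- B's non-last row equals the spec row
lemma eq3Row_blocks (N i : Nat) (h : i + 1 < N) :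
    List.replicate i (-1 : Int) ++ [1] ++ List.replicate (N - 2 - i) 0 ++ [1] = eq3Row N i := by
  have e1 : eq3Ent N i i = 1 := by simp [eq3Ent]
  have e2 : eq3Ent N i (N - 1) = 1 := by
    unfold eq3Ent
    rw [if_neg (by omega), if_neg (by omega), if_pos rfl]
  rw [eq3Row, range_split N i h]
  simp only [List.map_append, List.range'_one, List.map_cons, List.map_nil]
  rw [map_range'_const _ _ _ (-1) (by
      intro x _ hx
      unfold eq3Ent
      rw [if_pos (by omega)]),
    map_range'_const _ _ _ 0 (by
      intro x hx1 hx2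
      unfold eq3Ent
      rw [if_neg (by omega), if_neg (by omega), if_neg (by omega)]),
    e1, e2]

-- B's last row equals the spec row
lemma eq3Row_last (N : Nat) (h : 1 ≤ N) :
    List.replicate (N - 1) (-1 : Int) ++ [1] = eq3Row N (N - 1) := by
  rw [eq3Row, List.range_eq_range',
    show N = N - 1 + 1 by omega,
    ← range'_append_of 0 (N - 1) (N - 1) 1 (by omega)]
  simp only [List.map_append, List.range'_one, List.map_cons, List.map_nil,
    Nat.add_sub_cancel]
  rw [map_range'_const _ _ _ (-1) (by
      intro x _ hx
      unfold eq3Ent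
      rw [if_pos (by omega)])]
  simp [eq3Ent]

lemma set_append_left_len (P Z : List Int) (c : Nat) (v : Int) :
    (P ++ Z).set (P.length + c) v = P ++ Z.set c v := by
  simp

-- setting inside the middle block of a three-part list
lemma set_middle (P Z R : List Int) (c : Nat) (v : Int) (hc : c < Z.length) :
    (P ++ Z ++ R).set (P.length + c) v = P ++ Z.set c v ++ R := by
  rw [List.append_assoc, List.append_assoc]
  simp [hc]

-- a fold of in-place sets inside the middle block stays inside the middle block
lemma foldl_set_middle (P R : List Int) (v : Int) :
    ∀ (l : List Nat) (Z : List Int), (∀ j ∈ l, j < Z.length) →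
      l.foldl (fun g j => g.set (P.length + j) v) (P ++ Z ++ R)
        = P ++ l.foldl (fun Z j => Z.set j v) Z ++ R := by
  intro l
  induction l with
  | nil => intro Z _; rfl
  | cons j t ih =>
      intro Z hl
      simp only [List.foldl_cons]
      rw [set_middle P Z R j v (hl j (by simp))]
      exact ih _ (by intro x hx; simp only [List.length_set]; exact hl x (by simp [hx]))

-- pointwise result of a fold of constant sets
lemma getElem?_foldl_set (v : Int) :
    ∀ (l : List Nat) (g : List Int) (t : Nat),
      (l.foldl (fun g j => g.set j v) g)[t]?
        = if t ∈ l ∧ t < g.length then some v else g[t]? := by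
  intro l
  induction l with
  | nil => intro g t; simp
  | cons j tl ih =>
      intro g t
      simp only [List.foldl_cons]
      rw [ih (g.set j v) t]
      simp only [List.length_set, List.getElem?_set, List.mem_cons]
      by_cases hm : t ∈ tl
      · by_cases hl : t < g.length
        · simp [hm, hl]
        · simp [hm, hl]
          omega
      · by_cases hj : j = t
        · subst hj
          by_cases hl : j < g.length
          · simp [hm, hl]
          · simp [hm, hl]
        · have hj' : ¬ t = j := fun hx => hj hx.symm
          simp [hm, hj, hj']

-- A's processing of one row on a fresh zero row yields the spec row
lemma eq3_rowA (N k : Nat) (hk : k < N) :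
    (List.range k).foldl (fun g j => g.set j (-1))
        (((List.replicate N (0 : Int)).set (N - 1) 1).set k 1) = eq3Row N k := by
  apply List.ext_getElem?
  intro t
  rw [getElem?_foldl_set]
  simp only [List.length_set, List.length_replicate, List.mem_range, List.getElem?_set,
    List.getElem?_replicate, eq3Row, List.getElem?_map]
  by_cases htN : t < N
  · rw [List.getElem?_range htN]
    simp only [Option.map_some]
    unfold eq3Ent
    split_ifs <;> first | rfl | (exfalso; omega)
  · rw [List.getElem?_eq_none (by simpa using htN)]
    simp only [Option.map_none]
    split_ifs <;> first | rfl | (exfalso; omega)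

-- one application of A's row step on (done rows ++ zero tail)
lemma eq3_rowstep_on (N k m : Nat) (hk : k < N) (hm : 1 ≤ m) (P : List Int)
    (hP : P.length = k * N) :
    eq3_rowstep (N : Int) (P ++ List.replicate (m * N) 0) (k : Int)
      = P ++ eq3Row N k ++ List.replicate ((m - 1) * N) 0 := by
  have hN : 1 ≤ N := by omega
  have hmn : m * N = N + (m - 1) * N := by
    rw [Nat.sub_one_mul]
    have : N ≤ m * N := Nat.le_mul_of_pos_left N hm
    omega
  rw [hmn, List.replicate_add, ← List.append_assoc]
  simp only [eq3_rowstep]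
  have hc1 : (k : Int) * (N : Int) + (N : Int) - 1 = ((k * N + (N - 1) : Nat) : Int) := by
    push_cast [Nat.cast_sub hN]
    ring
  have hc2 : (k : Int) * (N : Int) + (k : Int) = ((k * N + k : Nat) : Int) := by
    push_cast; ring
  rw [hc1, PySem.List.pySetD_natCast, ← hP, set_middle _ _ _ _ _ (by simp; omega)]
  rw [hc2, PySem.List.pySetD_natCast, ← hP, set_middle _ _ _ _ _ (by simp; omega)]
  rw [PySem.List.pyRange_zero_natCast, List.foldl_map]
  rw [PySem.List.foldl_congr_mem' _ _
    (fun g (j : Nat) => g.set (P.length + j) (-1)) _ (by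
      intro j hj acc
      rw [List.mem_range] at hj
      have : (k : Int) * (N : Int) + (j : Int) = ((k * N + j : Nat) : Int) := by push_cast; ring
      rw [this, PySem.List.pySetD_natCast, ← hP])]
  rw [foldl_set_middle _ _ _ _ _ (by intro j hj; rw [List.mem_range] at hj; simp; omega)]
  rw [eq3_rowA N k hk]

-- A's whole g-loop computes eq3G
lemma eq3_g_inv (N : Nat) :
    ∀ (m k : Nat), k + m = N →
      (List.range' k m).foldl (fun g (i : Nat) => eq3_rowstep (N : Int) g (i : Int))
          ((List.range k).flatMap (eq3Row N) ++ List.replicate (m * N) 0)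
        = eq3G N := by
  intro m
  induction m with
  | zero =>
      intro k hkm
      simp only [List.range', Nat.zero_mul, List.replicate_zero, List.append_nil]
      rw [show k = N by omega]; rfl
  | succ m ih =>
      intro k hkm
      rw [List.range'_succ]
      simp only [List.foldl_cons]
      rw [eq3_rowstep_on N k (m + 1) (by omega) (by omega) _ (eq3_flat_length N k)]
      have : (List.range k).flatMap (eq3Row N) ++ eq3Row N k
          = (List.range (k + 1)).flatMap (eq3Row N) := by
        simp [List.range_succ]
      rw [Nat.add_sub_cancel, List.append_assoc, ← List.append_assoc, this]
      exact ih (k + 1) (by omega)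

lemma eq3_zeros (M : Nat) :
    (PySem.List.pyRange 0 (M : Int) 1).map (fun _ => (0 : Int)) = List.replicate M 0 := by
  rw [PySem.List.pyRange_zero_natCast, List.map_map]
  simp only [Function.comp_def]
  rw [List.map_const']
  simp

lemma eq3Row_getD (N i j : Nat) (hj : j < N) :
    (eq3Row N i).getD j 0 = eq3Ent N i j := by
  simp [eq3Row, List.getD_eq_getElem?_getD, List.getElem?_range hj]

-- reading eq3G at a flat index
lemma eq3G_getD (N i j : Nat) (hi : i < N) (hj : j < N) :
    (eq3G N).getD (i * N + j) 0 = eq3Ent N i j := by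
  have key : ∀ K : Nat, i < K →
      ((List.range K).flatMap (eq3Row N)).getD (i * N + j) 0 = eq3Ent N i j := by
    intro K
    induction K with
    | zero => omega
    | succ k ih =>
        intro hik
        rw [List.range_succ, List.flatMap_append]
        by_cases hik' : i < k
        · rw [List.getD_append _ _ _ _ (by
            rw [eq3_flat_length]
            calc i * N + j < i * N + N := by omega
              _ = (i + 1) * N := by ring
              _ ≤ k * N := Nat.mul_le_mul_right N (by omega))]
          exact ih hik'
        · have hik2 : i = k := by omega
          subst hik2
          rw [List.getD_append_right _ _ _ _ (by rw [eq3_flat_length]; omega)]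
          rw [eq3_flat_length]
          simpa [Nat.add_sub_cancel_left] using eq3Row_getD N i j hj
  exact key N hi

-- abs-sum of one row
lemma eq3S_sum (N i : Nat) (hi : i < N) :
    ((List.range N).map (fun j => |eq3Ent N i j|)).sum = eq3S N i := by
  have habs : (List.range N).map (fun j => |eq3Ent N i j|) = (eq3Row N i).map (fun x => |x|) := by
    simp [eq3Row, List.map_map, Function.comp]
  rw [habs]
  by_cases hlast : i = N - 1
  · subst hlast
    rw [← eq3Row_last N (by omega)]
    simp [List.sum_replicate, eq3S]
    omega
  · rw [← eq3Row_blocks N i (by omega)]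
    simp [List.sum_replicate, eq3S, hlast]

-- the loop  for j: b[i] += w j
lemma foldl_set_add (i : Nat) (w : Nat → Int) :
    ∀ (l : List Nat) (b : List Int), i < b.length →
      l.foldl (fun b j => b.set i (b.getD i 0 + w j)) b
        = b.set i (b.getD i 0 + (l.map w).sum) := by
  intro l
  induction l with
  | nil =>
      intro b hb
      simp [List.getD_eq_getElem?_getD, List.getElem?_eq_getElem hb]
  | cons j tl ih =>
      intro b hb
      rw [List.foldl_cons, ih _ (by simpa using hb)]
      have hgd : (b.set i (b.getD i 0 + w j)).getD i 0 = b.getD i 0 + w j := by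
        simp [List.getD_eq_getElem?_getD, hb]
      rw [hgd, List.set_set, List.map_cons, List.sum_cons]
      ring_nf

-- one application of A's abs-sum row step
lemma eq3_bstep_on (N k : Nat) (hk : k < N) (b : List Int) (hb : b.length = N) :
    eq3_bstep (N : Int) (eq3G N) b (k : Int) = b.set k (b.getD k 0 + eq3S N k) := by
  simp only [eq3_bstep]
  rw [PySem.List.pyRange_zero_natCast, List.foldl_map]
  rw [PySem.List.foldl_congr_mem' _ _
    (fun b (j : Nat) => b.set k (b.getD k 0 + |eq3Ent N k j|)) _ (by
      intro j hj acc
      rw [List.mem_range] at hj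
      have hc : (k : Int) * (N : Int) + (j : Int) = ((k * N + j : Nat) : Int) := by
        push_cast; ring
      rw [hc, PySem.List.pySetD_natCast, PySem.List.pyGetD_natCast, PySem.List.pyGetD_natCast,
        eq3G_getD N k j hk hj])]
  have hfold := foldl_set_add k (fun j => |eq3Ent N k j|) (List.range N) b (by omega)
  rw [eq3S_sum N k hk] at hfold
  exact hfold

-- A's whole b-loop computes eq3B
lemma eq3_b_inv (N : Nat) :
    ∀ (m k : Nat), k + m = N →
      (List.range' k m).foldl (fun b (i : Nat) => eq3_bstep (N : Int) (eq3G N) b (i : Int))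
          ((List.range k).map (eq3S N) ++ List.replicate m 0)
        = eq3B N := by
  intro m
  induction m with
  | zero =>
      intro k hkm
      simp only [List.range', List.replicate_zero, List.append_nil]
      rw [show k = N by omega]; rfl
  | succ m ih =>
      intro k hkm
      rw [List.range'_succ]
      simp only [List.foldl_cons]
      rw [eq3_bstep_on N k (by omega) _ (by simp; omega)]
      have hgd : ((List.range k).map (eq3S N) ++ List.replicate (m + 1) 0).getD k 0 = 0 := by
        rw [List.getD_append_right _ _ _ _ (by simp)]
        simp
      have hset : ((List.range k).map (eq3S N) ++ List.replicate (m + 1) 0).set k (eq3S N k)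
          = (List.range (k + 1)).map (eq3S N) ++ List.replicate m 0 := by
        have h2 := set_append_left_len ((List.range k).map (eq3S N))
          (0 :: List.replicate m 0) 0 (eq3S N k)
        simp only [List.length_map, List.length_range, Nat.add_zero, List.set_cons_zero] at h2
        rw [List.replicate_succ, h2, List.range_succ, List.map_append]
        simp
      rw [hgd, zero_add, hset]
      exact ih (k + 1) (by omega)

lemma eq3_A_eq (N : Nat) : equation_3 (N : Int) = (eq3G N, eq3B N) := by
  simp only [equation_3]
  have hNN : ((N : Int) * N) = ((N * N : Nat) : Int) := by push_cast; ring
  rw [hNN, eq3_zeros (N * N), eq3_zeros N, PySem.List.pyRange_zero_natCast,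
    List.foldl_map, List.foldl_map]
  have hg : (List.range N).foldl (fun g (i : Nat) => eq3_rowstep (N : Int) g (i : Int))
      (List.replicate (N * N) 0) = eq3G N := by
    have h0 := eq3_g_inv N N 0 (by omega)
    simp only [List.range_zero, List.flatMap_nil, List.nil_append] at h0
    rw [List.range_eq_range']
    exact h0
  rw [hg]
  have hb : (List.range N).foldl (fun b (i : Nat) => eq3_bstep (N : Int) (eq3G N) b (i : Int))
      (List.replicate N 0) = eq3B N := by
    have h0 := eq3_b_inv N N 0 (by omega)
    simp only [List.range_zero, List.map_nil, List.nil_append] at h0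
    rw [List.range_eq_range']
    exact h0
  rw [hb]

lemma eq3_B_eq (N : Nat) : equation_3_alt (N : Int) = (eq3G N, eq3B N) := by
  cases N with
  | zero =>
      simp [equation_3_alt, eq3G, eq3B, PySem.List.pyRange]
  | succ M =>
      simp only [equation_3_alt]
      have h1 : ((M + 1 : Nat) : Int) - 1 = ((M : Nat) : Int) := by push_cast; ring
      rw [h1, PySem.List.pyRange_zero_natCast, List.foldl_map]
      rw [PySem.List.foldl_congr_mem' _ _ (fun g (i : Nat) => g ++ eq3Row (M + 1) i) _ (by
        intro i hi acc
        rw [List.mem_range] at hi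
        rw [PySem.List.pyRepeat_singleton, PySem.List.pyRepeat_singleton]
        have t1 : ((i : Int)).toNat = i := by omega
        have t2 : (((M + 1 : Nat) : Int) - 2 - (i : Int)).toNat = (M + 1) - 2 - i := by omega
        rw [t1, t2, List.append_assoc, List.append_assoc, ← List.append_assoc (List.replicate i (-1)),
          ← List.append_assoc (List.replicate i (-1) ++ [1]), eq3Row_blocks (M + 1) i (by omega)])]
      rw [PySem.List.foldl_append_eq_flatMap (g := eq3Row (M + 1)), List.nil_append]
      have hge : ((M + 1 : Nat) : Int) ≥ 1 := by push_cast; omega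
      rw [if_pos hge, if_pos hge]
      rw [PySem.List.pyRepeat_singleton]
      have t3 : ((M : Nat) : Int).toNat = M := by omega
      rw [t3, show List.replicate M (-1 : Int) = List.replicate ((M + 1) - 1) (-1) by simp,
        eq3Row_last (M + 1) (by omega)]
      have hG : (List.range M).flatMap (eq3Row (M + 1)) ++ eq3Row (M + 1) ((M + 1) - 1)
          = eq3G (M + 1) := by
        simp [eq3G, List.range_succ]
      rw [hG]
      have hB : (List.map (fun k : Nat => (k : Int)) (List.range M)).map (fun i => i + 2)
            ++ [((M + 1 : Nat) : Int)] = eq3B (M + 1) := by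
        rw [List.map_map, eq3B, List.range_succ, List.map_append]
        congr 1
        · apply List.map_congr_left
          intro a ha
          rw [List.mem_range] at ha
          simp only [Function.comp, eq3S]
          rw [if_neg (by omega)]
        · simp [eq3S]
      rw [hB]

-- ===== VERDICT (by name: the statement is the Claim_ definition above) =====
theorem equation_3_spec : Claim_equal_equation_3 := by
  intro n _ hpre
  unfold Spec_equation_3
  lift n to ℕ using hpre
  rw [eq3_A_eq, eq3_B_eq]
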